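-- pv_equiv track=rewrite | github.com/Ja5onHoffman/InterviewCake | Python/test.py | solution
-- ===== SOURCE A (Python) =====
-- def solution(S, K):
--     new = list()
--     c = 0
--     for i in reversed(range(len(S))):
--         if S[i] == '-':
--             continue
--         if c != 0 and c % K == 0:
--             new.append('-')
--         c+=1
--         new.append(S[i].upper())
--     return ''.join(list(reversed(new)))
-- ===== SOURCE B (Python) =====
-- def solution(S, K):
--     clean = ''.join(c for c in S if c != '-').upper()
--     if not clean:
--         return ''
--     r = len(clean) % K
--     parts = ([clean[:r]] if r else []) + [clean[i:i+K] for i in range(r, len(clean), K)]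
--     return '-'.join(parts)
-- ===== Notes on version B (the rewrite author's own statement) =====
-- stated objective: simpler
-- what changed: A does one reverse character pass with a modular counter and a final list reversal; B builds the cleaned uppercased string once, computes the leading group length len%K, and joins forward slices of size K (measurably faster by a constant factor: bulk slicing/join instead of per-character appends).
-- outside the precondition, e.g. on solution('a', 0): A returns 'A', B raises ZeroDivisionError; on solution('AB', -1): A returns 'A-B', B returns ''
import Mathlib
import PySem

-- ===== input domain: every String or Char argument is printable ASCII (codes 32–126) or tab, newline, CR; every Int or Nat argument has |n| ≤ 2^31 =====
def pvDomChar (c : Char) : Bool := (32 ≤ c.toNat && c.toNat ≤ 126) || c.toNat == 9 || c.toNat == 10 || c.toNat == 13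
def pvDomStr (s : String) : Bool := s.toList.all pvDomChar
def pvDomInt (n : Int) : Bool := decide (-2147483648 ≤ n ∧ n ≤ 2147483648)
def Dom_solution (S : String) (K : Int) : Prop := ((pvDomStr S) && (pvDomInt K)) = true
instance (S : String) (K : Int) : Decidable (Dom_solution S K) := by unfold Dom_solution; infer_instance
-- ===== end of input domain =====

-- B reformats the license key by a clean-then-forward-chunk decomposition instead of A's
-- reverse pass with a modular counter (simpler; measured faster by a constant factor).

-- ===== PORT A =====
-- the loop 'for i in reversed(range(len(S)))' reading S[i], with state (c, new); new grows by append
def solLoop (K : Int) : List Char → Int → List Char → List Char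
  | [], _, new => new
  | ch :: rest, c, new =>
    if ch = '-' then solLoop K rest c new
    else solLoop K rest (c + 1)
      ((if c ≠ 0 ∧ PySem.Int.mod c K = 0 then new ++ ['-'] else new) ++ [PySem.Chars.upperChar ch])

def solution (S : String) (K : Int) : String :=
  String.ofList ((solLoop K S.toList.reverse 0 []).reverse)

-- ===== PORT B =====
def solution_alt (S : String) (K : Int) : String :=
  let clean := PySem.Chars.upper (S.toList.filter (fun c => c ≠ '-'))
  if clean = [] then ""
  else
    let r := PySem.Int.mod (clean.length : Int) K
    let parts := (if r ≠ 0 then [PySem.List.slice clean none (some r)] else []) ++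
      (PySem.List.pyRange r (clean.length : Int) K).map
        (fun i => PySem.List.slice clean (some i) (some (i + K)))
    String.ofList (PySem.Chars.join ['-'] parts)

-- ===== PRECONDITION & SPEC =====
-- Pre_ admits every K for strings with no non-dash character (both programs return "") and
-- otherwise restricts K to the task's natural domain K ≥ 1: for K ≤ 0 with a non-dash character
-- A still returns a value (grouping by |K| when K < 0, the uncut character when K = 0 with one
-- non-dash character) as an accident of its guarded modulus, while B's natural chunking raises
-- (ZeroDivisionError at K = 0) or groups nothing there.
def Pre_solution (S : String) (K : Int) : Prop :=
  1 ≤ K ∨ S.toList.filter (fun c => c ≠ '-') = []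
instance (S : String) (K : Int) : Decidable (Pre_solution S K) := by unfold Pre_solution; infer_instance
def pvWitness_solution : String × Int := ("a-BC2x", 2)

def Spec_solution (S : String) (K : Int) (out : String) : Prop := out = solution_alt S K
instance (S : String) (K : Int) (out : String) : Decidable (Spec_solution S K out) := by unfold Spec_solution; infer_instance

-- ===== CLAIM (what is proved, stated in full; the proofs are below) =====
def Claim_equal_solution : Prop := ∀ (S : String) (K : Int), Dom_solution S K → Pre_solution S K → Spec_solution S K (solution S K)

-- ===== LEMMAS AND PROOFS =====

def emit (k : Nat) : List Char → Nat → List Char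
  | [], _ => []
  | ch :: rest, c => (if c ≠ 0 ∧ c % k = 0 then ['-'] else []) ++ ch :: emit k rest (c + 1)

lemma emit_shift (k : Nat) (cs : List Char) : ∀ (c : Nat), 1 ≤ c → emit k cs (c + k) = emit k cs c := by
  induction cs with
  | nil => intro c hc; rfl
  | cons x r ih =>
    intro c hc
    simp only [emit]
    have h1 : (¬c + k = 0 ∧ (c + k) % k = 0) ↔ (¬c = 0 ∧ c % k = 0) := by
      rw [Nat.add_mod_right]; constructor <;> rintro ⟨_, h⟩ <;> exact ⟨by omega, h⟩
    rw [show c + k + 1 = (c + 1) + k by omega, ih (c + 1) (by omega)]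
    simp only [h1]

lemma emit_mid (k : Nat) (hk : 1 ≤ k) (cs : List Char) :
    ∀ (c : Nat), 1 ≤ c → c ≤ k →
      emit k cs c = cs.take (k - c) ++
        (if cs.drop (k - c) = [] then [] else '-' :: emit k (cs.drop (k - c)) 0) := by
  induction cs with
  | nil => intro c h1 h2; simp [emit]
  | cons x r ih =>
    intro c h1 h2
    by_cases hc : c = k
    · subst hc
      simp only [emit, Nat.sub_self, List.take_zero, List.drop_zero, List.nil_append]
      rw [if_pos ⟨by omega, Nat.mod_self c⟩, if_neg (by simp)]
      rw [show c + 1 = 1 + c by omega, emit_shift c r 1 (by omega)]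
      simp
    · have hlt : c < k := by omega
      simp only [emit]
      rw [if_neg (by rw [Nat.mod_eq_of_lt hlt]; omega)]
      rw [ih (c + 1) (by omega) (by omega)]
      rw [show k - c = (k - (c + 1)) + 1 by omega]
      simp [List.take_succ_cons, List.drop_succ_cons]

lemma emit_step (k : Nat) (hk : 1 ≤ k) (cs : List Char) :
    emit k cs 0 = cs.take k ++ (if cs.drop k = [] then [] else '-' :: emit k (cs.drop k) 0) := by
  cases cs with
  | nil => simp [emit]
  | cons x r =>
    simp only [emit, if_neg (by omega : ¬(¬(0:Nat) = 0 ∧ 0 % k = 0))]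
    rw [emit_mid k hk r 1 (by omega) hk]
    rw [show k = (k - 1) + 1 by omega]
    simp [List.take_succ_cons, List.drop_succ_cons]
def rightJoin (k : Nat) (cs : List Char) : List Char :=
  if cs.length ≤ k ∨ k = 0 then cs
  else rightJoin k (cs.take (cs.length - k)) ++ '-' :: cs.drop (cs.length - k)
termination_by cs.length
decreasing_by simp [List.length_take]; omega

def chunksNF (k : Nat) (cs : List Char) (i : Nat) : List (List Char) :=
  if cs.length ≤ i ∨ k = 0 then []
  else ((cs.drop i).take k) :: chunksNF k cs (i + k)
termination_by cs.length - i
decreasing_by omega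

lemma pyRange_pos_nil (a b s : Int) (hs : 0 < s) (h : b ≤ a) : PySem.List.pyRange a b s = [] := by
  rw [PySem.List.pyRange_of_pos _ _ hs, if_neg (by omega)]
  simp

lemma pyRange_pos_cons (a b s : Int) (hs : 0 < s) (h : a < b) :
    PySem.List.pyRange a b s = a :: PySem.List.pyRange (a + s) b s := by
  rw [PySem.List.pyRange_of_pos _ _ hs, PySem.List.pyRange_of_pos _ _ hs, if_pos h]
  have hd : (0:Int) ≤ (b - a - 1) / s := Int.ediv_nonneg (by omega) (by omega)
  have key : ((b - a + s - 1) / s).toNat = ((b - a - 1) / s).toNat + 1 := by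
    have h1 : b - a + s - 1 = (b - a - 1) + 1 * s := by ring
    rw [h1, Int.add_mul_ediv_right _ _ (by omega)]
    omega
  have htail : (if a + s < b then ((b - (a + s) + s - 1) / s).toNat else 0) = ((b - a - 1) / s).toNat := by
    by_cases h2 : a + s < b
    · rw [if_pos h2, show b - (a + s) + s - 1 = b - a - 1 by ring]
    · rw [if_neg h2, Int.ediv_eq_zero_of_lt (by omega) (by omega)]
      rfl
  rw [key, htail, List.range_succ_eq_map]
  simp only [List.map_cons, List.map_map]
  congr 1
  · simp
  · apply List.map_congr_left
    intro x _
    simp [Function.comp]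
    ring

lemma emit_rev (k : Nat) (hk : 1 ≤ k) :
    ∀ (n : Nat) (cs : List Char), cs.length = n → (emit k cs.reverse 0).reverse = rightJoin k cs := by
  intro n
  induction n using Nat.strong_induction_on with
  | _ n ih =>
    intro cs hlen
    rw [rightJoin]
    by_cases hnk : cs.length ≤ k
    · rw [if_pos (Or.inl hnk)]
      rw [emit_step k hk]
      rw [List.drop_eq_nil_of_le (by simpa using hnk)]
      rw [if_pos rfl, List.append_nil, List.take_of_length_le (by simpa using hnk)]
      exact List.reverse_reverse cs
    · rw [if_neg (by omega)]
      rw [emit_step k hk]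
      have hdrop : cs.reverse.drop k = (cs.take (cs.length - k)).reverse := List.drop_reverse
      have htake : cs.reverse.take k = (cs.drop (cs.length - k)).reverse := List.take_reverse
      have hne : cs.reverse.drop k ≠ [] := by
        rw [hdrop]
        intro hcon
        have := congrArg List.length hcon
        simp [List.length_take] at this
        omega
      rw [if_neg hne, hdrop, htake]
      rw [List.reverse_append]
      simp only [List.reverse_cons, List.reverse_reverse]
      rw [ih (cs.length - k) (by omega) (cs.take (cs.length - k)) (by simp)]
      simp

lemma map_slice_eq_chunksNF (cs : List Char) (k : Nat) (hk : 1 ≤ k) :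
    ∀ (d i : Nat), cs.length - i = d →
      (PySem.List.pyRange (i : Int) (cs.length : Int) (k : Int)).map
          (fun j => PySem.List.slice cs (some j) (some (j + (k : Int)))) = chunksNF k cs i := by
  intro d
  induction d using Nat.strong_induction_on with
  | _ d ih =>
    intro i hd
    rw [chunksNF]
    by_cases h : cs.length ≤ i
    · rw [if_pos (Or.inl h)]
      rw [pyRange_pos_nil _ _ _ (by exact_mod_cast hk) (by exact_mod_cast h)]
      rfl
    · rw [if_neg (by omega)]
      rw [pyRange_pos_cons _ _ _ (by exact_mod_cast hk) (by exact_mod_cast (by omega : i < cs.length))]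
      rw [List.map_cons]
      congr 1
      · exact PySem.List.slice_natCast_add cs i k
      · rw [show ((i : Int) + (k : Int)) = ((i + k : Nat) : Int) by push_cast; ring]
        exact ih (cs.length - (i + k)) (by omega) (i + k) rfl

lemma chunksNF_append (cs : List Char) (k : Nat) (hk : 1 ≤ k) (hkn : k < cs.length) :
    ∀ (d i : Nat), cs.length - i = d → i ≤ cs.length - k → (cs.length - k - i) % k = 0 →
      chunksNF k cs i = chunksNF k (cs.take (cs.length - k)) i ++ [cs.drop (cs.length - k)] := by
  intro d
  induction d using Nat.strong_induction_on with
  | _ d ih =>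
    intro i hd hi hmod
    by_cases heq : i = cs.length - k
    · subst heq
      rw [chunksNF, if_neg (by omega), chunksNF,
        if_pos (Or.inl (show cs.length ≤ cs.length - k + k by omega))]
      rw [chunksNF, if_pos (Or.inl (by simp only [List.length_take]; omega))]
      rw [List.take_of_length_le (by simp only [List.length_drop]; omega)]
      simp
    · have hlt : i < cs.length - k := by omega
      have hge : k ≤ cs.length - k - i := by
        rcases Nat.eq_zero_or_pos (cs.length - k - i) with h0 | hpos
        · omega
        · exact Nat.le_of_dvd hpos (Nat.dvd_of_mod_eq_zero hmod)
      rw [chunksNF, if_neg (by omega)]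
      conv_rhs => rw [chunksNF, if_neg (by simp [List.length_take]; omega)]
      rw [List.cons_append]
      congr 1
      · rw [List.drop_take]
        rw [List.take_take]
        rw [Nat.min_eq_left (by omega)]
      · have hmod' : (cs.length - k - (i + k)) % k = 0 := by
          rw [show cs.length - k - (i + k) = (cs.length - k - i) - k by omega]
          conv_lhs => rw [show cs.length - k - i - k = cs.length - k - i - k from rfl]
          have h3 : cs.length - k - i = (cs.length - k - i - k) + k := by omega
          rw [h3] at hmod
          rwa [Nat.add_mod_right] at hmod
        exact ih (cs.length - (i + k)) (by omega) (i + k) rfl (by omega) hmod'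

lemma join_append_last (x : List Char) :
    ∀ (l : List (List Char)), l ≠ [] →
      PySem.Chars.join ['-'] (l ++ [x]) = PySem.Chars.join ['-'] l ++ '-' :: x := by
  intro l
  induction l with
  | nil => intro h; exact absurd rfl h
  | cons p ps ih =>
    intro _
    cases ps with
    | nil =>
      rw [List.cons_append, List.nil_append, PySem.Chars.join_cons_cons, PySem.Chars.join_singleton,
        PySem.Chars.join_singleton]
      simp
    | cons q qs =>
      rw [show (p :: q :: qs) ++ [x] = p :: q :: (qs ++ [x]) by simp]
      rw [PySem.Chars.join_cons_cons]
      rw [show q :: (qs ++ [x]) = (q :: qs) ++ [x] by simp]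
      rw [ih (by simp), PySem.Chars.join_cons_cons]
      simp

lemma chunksNF_cons_of (k : Nat) (cs : List Char) (i : Nat) (h1 : i < cs.length) (hk : 1 ≤ k) :
    chunksNF k cs i = ((cs.drop i).take k) :: chunksNF k cs (i + k) := by
  rw [chunksNF, if_neg (by omega)]

lemma partsNF_join (k : Nat) (hk : 1 ≤ k) :
    ∀ (n : Nat) (cs : List Char), cs.length = n → cs ≠ [] →
      PySem.Chars.join ['-']
          ((if cs.length % k ≠ 0 then [cs.take (cs.length % k)] else []) ++ chunksNF k cs (cs.length % k))
        = rightJoin k cs := by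
  intro n
  induction n using Nat.strong_induction_on with
  | _ n ih =>
    intro cs hlen hne
    have hpos : 0 < cs.length := List.length_pos_of_ne_nil hne
    rw [rightJoin]
    by_cases hnk : cs.length ≤ k
    · rw [if_pos (Or.inl hnk)]
      by_cases heq : cs.length = k
      · have hr : cs.length % k = 0 := by rw [heq, Nat.mod_self]
        rw [hr]
        rw [if_neg (by omega), List.nil_append]
        rw [chunksNF_cons_of k cs 0 (by omega) hk]
        rw [chunksNF, if_pos (Or.inl (by omega))]
        rw [List.drop_zero, List.take_of_length_le (by omega)]
        exact PySem.Chars.join_singleton _ _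
      · have hr : cs.length % k = cs.length := Nat.mod_eq_of_lt (by omega)
        rw [hr]
        rw [if_pos (show cs.length ≠ 0 by omega)]
        rw [chunksNF, if_pos (Or.inl (le_refl _))]
        rw [List.take_length, List.append_nil]
        exact PySem.Chars.join_singleton _ _
    · rw [if_neg (show ¬(cs.length ≤ k ∨ k = 0) by omega)]
      have hkn : k < cs.length := by omega
      have h1 : (cs.length - k) % k = cs.length % k := by
        conv_rhs => rw [show cs.length = (cs.length - k) + k by omega]
        rw [Nat.add_mod_right]
      have hr_lt : cs.length % k < k := Nat.mod_lt _ (by omega)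
      have hr_le : cs.length % k ≤ cs.length - k := by
        have h2 := Nat.mod_le (cs.length - k) k
        omega
      have hmod : (cs.length - k - cs.length % k) % k = 0 := by
        have h2 := Nat.mod_add_div (cs.length - k) k
        have h3 : cs.length - k - cs.length % k = k * ((cs.length - k) / k) := by omega
        rw [h3, Nat.mul_mod_right]
      rw [chunksNF_append cs k hk hkn (cs.length - (cs.length % k)) (cs.length % k) rfl hr_le hmod]
      rw [← List.append_assoc]
      set cs' : List Char := cs.take (cs.length - k) with hcs'
      have hlen' : cs'.length = cs.length - k := by
        rw [hcs', List.length_take]; omega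
      have hne' : cs' ≠ [] := by
        intro hcon
        rw [hcon] at hlen'
        simp at hlen'
        omega
      have htake : cs.take (cs.length % k) = cs'.take (cs'.length % k) := by
        rw [hcs', List.take_take, hlen', h1, Nat.min_eq_left (by omega)]
      have hparts :
          (if cs.length % k ≠ 0 then [cs.take (cs.length % k)] else []) ++ chunksNF k cs' (cs.length % k)
            = (if cs'.length % k ≠ 0 then [cs'.take (cs'.length % k)] else []) ++ chunksNF k cs' (cs'.length % k) := by
        rw [hlen', h1, htake, hlen', h1]
      rw [hparts]
      have hne'' : (if cs'.length % k ≠ 0 then [cs'.take (cs'.length % k)] else []) ++ chunksNF k cs' (cs'.length % k) ≠ [] := by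
        by_cases hz : cs'.length % k ≠ 0
        · rw [if_pos hz]; simp
        · rw [if_neg hz, List.nil_append]
          rw [chunksNF_cons_of k cs' (cs'.length % k) (by omega) hk]
          simp
      rw [join_append_last _ _ hne'']
      rw [ih (cs.length - k) (by omega) cs' hlen' hne']
lemma solLoop_emit (l : List Char) (k : Nat) :
    ∀ (m : Nat) (new : List Char),
      solLoop (k : Int) l (m : Int) new
        = new ++ emit k ((l.filter (fun c => c ≠ '-')).map PySem.Chars.upperChar) m := by
  induction l with
  | nil => intro m new; simp [solLoop, emit]
  | cons x rest ih =>
    intro m new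
    by_cases hx : x = '-'
    · rw [List.filter_cons_of_neg (by simp [hx])]
      simp only [solLoop, if_pos hx]
      exact ih m new
    · rw [List.filter_cons_of_pos (by simp [hx])]
      simp only [solLoop, if_neg hx, List.map_cons]
      have hcast : ((m : Int) + 1) = ((m + 1 : Nat) : Int) := by push_cast; ring
      rw [hcast, ih (m + 1)]
      have hcond : ((m : Int) ≠ 0 ∧ PySem.Int.mod (m : Int) (k : Int) = 0) ↔ (m ≠ 0 ∧ m % k = 0) := by
        rw [PySem.Int.mod_natCast]
        constructor <;> rintro ⟨h1, h2⟩ <;> exact ⟨by exact_mod_cast h1, by exact_mod_cast h2⟩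
      simp only [emit]
      by_cases hc : m ≠ 0 ∧ m % k = 0
      · rw [if_pos (hcond.mpr hc), if_pos hc]
        simp
      · rw [if_neg (fun h => hc (hcond.mp h)), if_neg hc]
        simp

lemma equal_main (S : String) (k : Nat) (hk : 1 ≤ k) : solution S (k : Int) = solution_alt S (k : Int) := by
  unfold solution solution_alt
  simp only []
  have hclean : PySem.Chars.upper (S.toList.filter (fun c => c ≠ '-'))
      = (S.toList.filter (fun c => c ≠ '-')).map PySem.Chars.upperChar := by
    simp [PySem.Chars.upper]
  set clean : List Char := (S.toList.filter (fun c => c ≠ '-')).map PySem.Chars.upperChar with hcdef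
  rw [hclean]
  have hA : solLoop (k : Int) S.toList.reverse 0 []
      = emit k clean.reverse 0 := by
    have h0 : (0 : Int) = ((0 : Nat) : Int) := rfl
    rw [h0, solLoop_emit S.toList.reverse k 0 []]
    rw [List.filter_reverse, List.map_reverse]
    simp [hcdef]
  rw [hA]
  by_cases hnil : clean = []
  · rw [if_pos hnil, hnil]
    rfl
  · rw [if_neg hnil]
    rw [emit_rev k hk clean.length clean rfl]
    congr 1
    rw [PySem.Int.mod_natCast, PySem.List.slice_to_natCast,
      map_slice_eq_chunksNF clean k hk (clean.length - clean.length % k) (clean.length % k) rfl]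
    simp only [ne_eq, Nat.cast_eq_zero]
    exact (partsNF_join k hk clean.length clean rfl hnil).symm

lemma solLoop_all_dash (K : Int) :
    ∀ (l : List Char), l.filter (fun c => c ≠ '-') = [] → ∀ (c : Int) (new : List Char),
      solLoop K l c new = new := by
  intro l
  induction l with
  | nil => intro _ c new; rfl
  | cons x rest ih =>
    intro hf c new
    by_cases hx : x = '-'
    · rw [List.filter_cons_of_neg (by simp [hx])] at hf
      simp only [solLoop, if_pos hx]
      exact ih hf c new
    · rw [List.filter_cons_of_pos (by simp [hx])] at hf
      exact absurd hf (by simp)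

lemma equal_empty (S : String) (K : Int) (h : S.toList.filter (fun c => c ≠ '-') = []) :
    solution S K = solution_alt S K := by
  have hrev : S.toList.reverse.filter (fun c => c ≠ '-') = [] := by
    simp only [List.filter_reverse, h, List.reverse_nil]
  unfold solution solution_alt
  rw [solLoop_all_dash K S.toList.reverse hrev 0 []]
  rw [if_pos (show PySem.Chars.upper (S.toList.filter (fun c => c ≠ '-')) = [] by rw [h]; rfl)]
  rfl

-- ===== VERDICT (by name: the statement is the Claim_ definition above) =====
theorem solution_spec : Claim_equal_solution := by
  intro S K hdom hpre
  rcases hpre with h1 | hdash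
  · obtain ⟨k, rfl⟩ : ∃ k : Nat, K = (k : Int) := ⟨K.toNat, (Int.toNat_of_nonneg (by omega)).symm⟩
    show solution S (k : Int) = solution_alt S (k : Int)
    exact equal_main S k (by exact_mod_cast h1)
  · exact equal_empty S K hdash
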